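-- pv_equiv track=rewrite | github.com/styx97/parallel_sort | MergeServer.py | breakarray
-- ===== SOURCE A (Python) =====
-- def breakarray(array, n):
-- 	sectionlength = len(array)//n
-- 	result = []
-- 	for i in range(n):
-- 		if i < n - 1:
-- 			result.append(array[i*sectionlength:(i+1)*sectionlength])
--
-- 		else:
-- 			result.append(array[i*sectionlength:])
--
-- 	return result
-- ===== SOURCE B (Python) =====
-- def breakarray(array, n):
--     if n <= 0:
--         return []
--     sectionlength = len(array) // n
--     it = iter(array)
--     result = []
--     for _ in range(n - 1):
--         chunk = []
--         for _ in range(sectionlength):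
--             chunk.append(next(it))
--         result.append(chunk)
--     result.append(list(it))  # the final section takes everything left in the stream
--     return result
-- ===== Notes on version B (the rewrite author's own statement) =====
-- stated objective: alternative
-- what changed: Replaces A's slice-offset arithmetic (each chunk cut out of the whole array at computed indices i*sectionlength) by a single forward consumption of an iterator over the array: each of the first n-1 sections is filled element by element from the stream and the last section drains whatever remains, so no slice boundaries are computed at all.
import Mathlib
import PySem

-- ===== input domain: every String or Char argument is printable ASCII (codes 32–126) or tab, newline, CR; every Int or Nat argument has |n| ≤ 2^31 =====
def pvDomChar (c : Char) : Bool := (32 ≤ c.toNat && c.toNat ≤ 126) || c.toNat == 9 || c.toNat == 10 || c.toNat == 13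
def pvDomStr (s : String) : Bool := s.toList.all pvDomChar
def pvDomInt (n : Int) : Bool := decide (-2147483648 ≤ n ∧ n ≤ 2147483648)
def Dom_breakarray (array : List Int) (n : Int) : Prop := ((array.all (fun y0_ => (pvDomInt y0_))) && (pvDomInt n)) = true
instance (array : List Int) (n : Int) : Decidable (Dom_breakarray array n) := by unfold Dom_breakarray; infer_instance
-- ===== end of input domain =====

-- B replaces A's index-arithmetic slicing loop by a single forward consumption of the element stream (an iterator): each section is filled element by element and the last section drains the rest; no slice offsets are computed; same cost, different decomposition.

-- ===== PORT A =====
def breakarray (array : List Int) (n : Int) : List (List Int) :=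
  let sectionlength := PySem.Int.floordiv (array.length : Int) n
  (PySem.List.pyRange 0 n 1).foldl
    (fun result i =>
      if i < n - 1 then
        result ++ [PySem.List.slice array (some (i * sectionlength)) (some ((i + 1) * sectionlength))]
      else
        result ++ [PySem.List.slice array (some (i * sectionlength)) none]) []

-- ===== PORT B =====
-- the iterator is modelled as the not-yet-consumed suffix of the list; next() on an exhausted
-- iterator would raise StopIteration, but B's loop bounds guarantee that never happens, so the
-- [] branch below is only a totality guard
def breakFill : Nat → List Int × List Int → List Int × List Int
  | 0, st => st
  | Nat.succ m, (chunk, it) =>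
      match it with
      | [] => (chunk, [])
      | x :: it' => breakFill m (chunk ++ [x], it')

def breakOuter (sl : Nat) : Nat → List (List Int) × List Int → List (List Int) × List Int
  | 0, st => st
  | Nat.succ m, (result, it) =>
      let st := breakFill sl ([], it)
      breakOuter sl m (result ++ [st.1], st.2)

def breakarray_alt (array : List Int) (n : Int) : List (List Int) :=
  if n ≤ 0 then []
  else
    -- sectionlength = len(array)//n ≥ 0 here, so iterating range(sectionlength) is .toNat steps
    let sectionlength := PySem.Int.floordiv (array.length : Int) n
    let st := breakOuter sectionlength.toNat (n.toNat - 1) ([], array)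
    st.1 ++ [st.2]

-- ===== PRECONDITION & SPEC =====
-- Python A raises ZeroDivisionError when n = 0; that is the only exclusion.
def Pre_breakarray (array : List Int) (n : Int) : Prop := n ≠ 0
instance (array : List Int) (n : Int) : Decidable (Pre_breakarray array n) := by unfold Pre_breakarray; infer_instance
def pvWitness_breakarray : List Int × Int := ([1, 2, 3, 4, 5], 2)
def Spec_breakarray (array : List Int) (n : Int) (out : List (List Int)) : Prop := out = breakarray_alt array n
instance (array : List Int) (n : Int) (out : List (List Int)) : Decidable (Spec_breakarray array n out) := by unfold Spec_breakarray; infer_instance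

-- ===== CLAIM (what is proved, stated in full; the proofs are below) =====
def Claim_equal_breakarray : Prop := ∀ (array : List Int) (n : Int), Dom_breakarray array n → Pre_breakarray array n → Spec_breakarray array n (breakarray array n)

-- ===== LEMMAS AND PROOFS =====

lemma breakFill_eq (m : Nat) :
    ∀ (chunk it : List Int), breakFill m (chunk, it) = (chunk ++ it.take m, it.drop m) := by
  induction m with
  | zero => intro chunk it; simp [breakFill]
  | succ k ih =>
      intro chunk it
      cases it with
      | nil => simp [breakFill]
      | cons x it' => simp [breakFill, ih]

lemma breakOuter_eq (sl : Nat) :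
    ∀ (m : Nat) (result : List (List Int)) (it : List Int),
      breakOuter sl m (result, it)
        = (result ++ (List.range m).map (fun j => (it.drop (j * sl)).take sl), it.drop (m * sl)) := by
  intro m
  induction m with
  | zero => intro result it; simp [breakOuter]
  | succ k ih =>
      intro result it
      rw [breakOuter, breakFill_eq, ih]
      conv_rhs => rw [List.range_succ_eq_map]
      simp only [List.nil_append, List.map_cons, List.map_map, Nat.zero_mul, List.drop_zero,
        List.append_assoc, List.singleton_append]
      simp only [Prod.mk.injEq]
      refine ⟨?_, ?_⟩
      · congr 1
        refine List.cons_eq_cons.mpr ⟨rfl, ?_⟩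
        apply List.map_congr_left
        intro j hj
        simp only [Function.comp, Nat.succ_eq_add_one, List.drop_drop]
        congr 2
        ring
      · rw [List.drop_drop]
        congr 1
        ring

lemma foldl_append_if_else {α β : Type} (p : α → Prop) [DecidablePred p] (f g : α → β) :
    ∀ (l : List α) (acc : List β),
      l.foldl (fun r i => if p i then r ++ [f i] else r ++ [g i]) acc
        = acc ++ l.map (fun i => if p i then f i else g i) := by
  intro l
  induction l with
  | nil => simp
  | cons x xs ih =>
      intro acc
      by_cases h : p x <;> simp [h, ih]

-- ===== VERDICT (by name: the statement is the Claim_ definition above) =====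
theorem breakarray_spec : Claim_equal_breakarray := by
  intro array n _ hn
  unfold Spec_breakarray breakarray breakarray_alt
  by_cases hneg : n ≤ 0
  · -- n < 0: A's range is empty, B returns []
    have : PySem.List.pyRange 0 n 1 = [] := PySem.List.pyRange_one_eq_nil (by omega)
    simp [this, hneg]
  · push_neg at hneg
    simp only [if_neg (by omega : ¬ n ≤ 0)]
    set sl := PySem.Int.floordiv (array.length : Int) n with hsl
    have hsl0 : 0 ≤ sl := by
      rw [hsl, PySem.Int.floordiv_eq_ediv_of_pos hneg]
      exact Int.ediv_nonneg (by positivity) (le_of_lt hneg)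
    rw [foldl_append_if_else]
    simp only [List.nil_append]
    rw [breakOuter_eq]
    simp only [List.nil_append]
    set s := sl.toNat with hsnat
    have hs : sl = (s : Int) := by omega
    set m := n.toNat - 1 with hm
    have hnm : n.toNat = m + 1 := by omega
    rw [PySem.List.pyRange_one]
    simp only [List.map_map, sub_zero]
    rw [hnm, List.range_succ, List.map_append, List.map_singleton]
    congr 1
    · apply List.map_congr_left
      intro j hj
      rw [List.mem_range] at hj
      simp only [Function.comp, zero_add]
      rw [if_pos (show (j : Int) < n - 1 by omega)]
      have h1 : ((j : Int) * sl) = ((j * s : Nat) : Int) := by rw [hs]; push_cast; ring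
      have h2 : (((j : Int) + 1) * sl) = (((j * s + s) : Nat) : Int) := by rw [hs]; push_cast; ring
      rw [h1, h2, PySem.List.slice_natCast]
      congr 1
      omega
    · simp only [Function.comp, zero_add]
      rw [if_neg (show ¬((m : Int) < n - 1) by omega)]
      have h1 : ((m : Int) * sl) = ((m * s : Nat) : Int) := by rw [hs]; push_cast; ring
      rw [h1, PySem.List.slice_from_natCast]
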